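-- pv_equiv track=rewrite | github.com/kiansweeney11/ca117-programming2 | q2_051.py | func
-- ===== SOURCE A (Python) =====
-- def func(s):
--     word = str(s).lower()
--     string = "evil"
--     for char in word:
--         if char not in string:
--             word = word.replace(char, "")
--     if word == string:
--         return("".join(s))
--     else:
--         return ""
-- ===== SOURCE B (Python) =====
-- def func(s):
--     # Streaming matcher: advance an index into "evil" for each relevant
--     # character; any out-of-order relevant character rejects immediately.
--     idx = 0
--     for c in str(s).lower():
--         if c in "evil":
--             if idx < 4 and "evil"[idx] == c:
--                 idx += 1
--             else:
--                 return ""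
--     return "".join(s) if idx == 4 else ""
-- ===== Notes on version B (the rewrite author's own statement) =====
-- stated objective: faster
-- what changed: Replaces the loop of repeated full-string str.replace passes (one rescan per removed character) with a single-pass state machine that advances an index into "evil" and rejects early on any out-of-order relevant character, never building intermediate strings.
import Mathlib
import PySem

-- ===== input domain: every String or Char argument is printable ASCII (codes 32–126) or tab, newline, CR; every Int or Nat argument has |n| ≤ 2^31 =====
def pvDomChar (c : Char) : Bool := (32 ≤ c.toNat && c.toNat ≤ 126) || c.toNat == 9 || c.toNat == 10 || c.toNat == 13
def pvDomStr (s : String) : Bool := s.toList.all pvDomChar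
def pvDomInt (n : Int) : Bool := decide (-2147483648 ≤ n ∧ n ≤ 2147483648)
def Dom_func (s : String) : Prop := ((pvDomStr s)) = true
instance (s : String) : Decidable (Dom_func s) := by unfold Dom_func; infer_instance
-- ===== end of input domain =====

-- B replaces A's repeated full-string replace passes with a one-pass state machine over the
-- string (an index into "evil" advanced per relevant character, early reject out of order).

-- ===== PORT A =====
-- state `word` is the string as a char list; the loop iterates over the SNAPSHOT taken at loop
-- entry (Python's `for char in word` iterates the original object even though `word` is rebound)
def func (s : String) : String :=
  let word0 := PySem.Chars.lower s.toList
  let word := word0.foldl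
    (fun w ch => if PySem.Chars.isIn [ch] "evil".toList then w
                 else PySem.Chars.replace w [ch] []) word0
  if word = "evil".toList then s else ""

-- ===== PORT B =====
-- `none` models Source B's early `return ""`; `some i` is the current index into "evil"
def pvStep (st : Option Nat) (c : Char) : Option Nat :=
  match st with
  | none => none
  | some i =>
    if PySem.Chars.isIn [c] "evil".toList then
      if i < 4 && ("evil".toList.getD i ' ' == c) then some (i + 1) else none
    else some i

def func_alt (s : String) : String :=
  match (PySem.Chars.lower s.toList).foldl pvStep (some 0) with
  | some 4 => s
  | _ => ""

-- ===== PRECONDITION & SPEC =====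
def Spec_func (s : String) (out : String) : Prop := out = func_alt s
instance (s : String) (out : String) : Decidable (Spec_func s out) := by unfold Spec_func; infer_instance

-- ===== CLAIM (what is proved, stated in full; the proofs are below) =====
def Claim_equal_func : Prop := ∀ (s : String), Dom_func s → Spec_func s (func s)

-- ===== LEMMAS AND PROOFS =====

-- str.replace with a one-char pattern and empty replacement is a filter
theorem replace_go_one (c : Char) :
    ∀ (fuel : Nat) (l acc : List Char), l.length ≤ fuel →
      PySem.Chars.replace.go [c] [] fuel l acc = acc.reverse ++ l.filter (· ≠ c) := by
  intro fuel
  induction fuel with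
  | zero =>
    intro l acc h
    have : l = [] := List.length_eq_zero_iff.mp (Nat.le_zero.mp h)
    subst this
    simp [PySem.Chars.replace.go]
  | succ n ih =>
    intro l acc h
    cases l with
    | nil => simp [PySem.Chars.replace.go]
    | cons x t =>
      simp only [PySem.Chars.replace.go]
      by_cases hx : x = c
      · subst hx
        simp only [List.isPrefixOf, BEq.rfl, Bool.true_and, if_true]
        rw [ih _ _ (by simpa using Nat.le_of_succ_le_succ h)]
        simp
      · have hpre : [c].isPrefixOf (x :: t) = false := by
          simp [List.isPrefixOf]; exact fun h' => (hx h'.symm).elim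
        rw [hpre]
        simp only [Bool.false_eq_true, if_false]
        rw [ih _ _ (by simpa using Nat.le_of_succ_le_succ h)]
        simp [hx]

theorem replace_one (w : List Char) (c : Char) :
    PySem.Chars.replace w [c] [] = w.filter (· ≠ c) := by
  simp only [PySem.Chars.replace]
  rw [replace_go_one c w.length w [] le_rfl]
  simp

-- the replace loop computes a filter: elements kept iff p holds or they do not occur in the snapshot
theorem foldl_filter_step (p : Char → Bool) :
    ∀ (L w : List Char),
      L.foldl (fun w ch => if p ch then w else w.filter (· ≠ ch)) w
        = w.filter (fun x => p x || !(L.contains x)) := by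
  intro L
  induction L with
  | nil => intro w; simp
  | cons c L ih =>
    intro w
    simp only [List.foldl_cons]
    by_cases hc : p c = true
    · rw [if_pos hc, ih]
      apply List.filter_congr
      intro x _
      by_cases hx : x = c
      · subst hx; simp [hc]
      · simp [hx]
    · rw [if_neg (by simp [hc]), ih, List.filter_filter]
      apply List.filter_congr
      intro x _
      by_cases hx : x = c
      · subst hx; simp [hc]
      · simp [hx]

theorem loop_eq_filter (p : Char → Bool) (L : List Char) :
    L.foldl (fun w ch => if p ch then w else w.filter (· ≠ ch)) L = L.filter p := by
  rw [foldl_filter_step]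
  apply List.filter_congr
  intro x hx
  simp [List.contains_eq_mem, hx]

-- B's fold characterised: it succeeds at i + (filtered length) iff the filtered
-- characters are a prefix of what remains of "evil" past index i
theorem fold_step_char :
    ∀ (L : List Char) (i : Nat),
      L.foldl pvStep (some i)
        = if (L.filter (fun c => PySem.Chars.isIn [c] "evil".toList)).isPrefixOf
              ("evil".toList.drop i)
          then some (i + (L.filter (fun c => PySem.Chars.isIn [c] "evil".toList)).length)
          else none := by
  intro L
  induction L with
  | nil => intro i; simp
  | cons c t ih =>
    intro i
    simp only [List.foldl_cons, List.filter_cons]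
    by_cases hp : PySem.Chars.isIn [c] "evil".toList = true
    · simp only [hp, if_true, pvStep]
      by_cases h4 : i < 4
      · have hdrop : "evil".toList.drop i = "evil".toList.getD i ' ' :: "evil".toList.drop (i + 1) := by
          interval_cases i <;> decide
        by_cases heq : "evil".toList.getD i ' ' = c
        · have h1 : decide (i < 4) = true := decide_eq_true h4
          have h2 : ("evil".toList.getD i ' ' == c) = true := beq_iff_eq.mpr heq
          rw [h1, h2]
          simp only [Bool.and_self, if_true]
          rw [ih]
          rw [hdrop, heq]
          simp only [List.isPrefixOf_cons₂_self]
          split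
          · simp; omega
          · rfl
        · have h2 : ("evil".toList.getD i ' ' == c) = false := beq_eq_false_iff_ne.mpr heq
          rw [h2, Bool.and_false]
          simp only [Bool.false_eq_true, if_false]
          have hnone : ∀ M : List Char, M.foldl pvStep none = none := by
            intro M; induction M with
            | nil => rfl
            | cons a b ihb => simpa [pvStep] using ihb
          rw [hnone]
          rw [hdrop]
          have : ((c :: t.filter (fun c => PySem.Chars.isIn [c] "evil".toList)).isPrefixOf
              ("evil".toList.getD i ' ' :: "evil".toList.drop (i + 1))) = false := by
            simp [List.isPrefixOf]
            intro h'; exact (heq h'.symm).elim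
          rw [this]
          simp
      · have h1 : decide (i < 4) = false := decide_eq_false h4
        rw [h1, Bool.false_and]
        simp only [Bool.false_eq_true, if_false]
        have hnone : ∀ M : List Char, M.foldl pvStep none = none := by
          intro M; induction M with
          | nil => rfl
          | cons a b ihb => simpa [pvStep] using ihb
        rw [hnone]
        have hdrop : "evil".toList.drop i = [] := by
          apply List.drop_eq_nil_of_le; simpa using h4
        rw [hdrop]
        simp [List.isPrefixOf]
    · simp only [pvStep, hp, Bool.false_eq_true, if_false, ih]

-- prefix of "evil" with final index 4 means exactly equal to "evil"
theorem fold_some_four_iff (L : List Char) :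
    (L.foldl pvStep (some 0) = some 4)
      ↔ L.filter (fun c => PySem.Chars.isIn [c] "evil".toList) = "evil".toList := by
  rw [fold_step_char L 0]
  constructor
  · intro h
    split at h
    · rename_i hpre
      have hlen : (L.filter (fun c => PySem.Chars.isIn [c] "evil".toList)).length = 4 := by
        simpa using congrArg (fun o => o.getD 0) h
      have hpre' := List.isPrefixOf_iff_prefix.mp hpre
      have hev : (List.drop 0 "evil".toList).length = 4 := by decide
      exact List.IsPrefix.eq_of_length hpre' (hlen.trans hev.symm)
    · exact absurd h (by simp)
  · intro h
    rw [h]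
    decide

-- ===== VERDICT (by name: the statement is the Claim_ definition above) =====
theorem func_spec : Claim_equal_func := by
  intro s _
  unfold Spec_func func func_alt
  simp only [replace_one, loop_eq_filter]
  by_cases h : (PySem.Chars.lower s.toList).filter
      (fun c => PySem.Chars.isIn [c] "evil".toList) = "evil".toList
  · rw [if_pos h, (fold_some_four_iff _).mpr h]
  · rw [if_neg h]
    rcases hfold : (PySem.Chars.lower s.toList).foldl pvStep (some 0) with _ | n
    · rfl
    · rcases Nat.decEq n 4 with hn | hn
      · simp [hn]
      · subst hn
        exact absurd ((fold_some_four_iff _).mp hfold) h
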